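-- pv_equiv track=rewrite | github.com/tmdals1207/Baekjoon-Study | 백준/Silver/9655. 돌 게임/돌 게임.py | stone
-- ===== SOURCE A (Python) =====
-- def stone(n):
--   d = n
--   cnt = 0
--   while (d != 0):
--     if (d >= 3):
--       d -= 3
--       cnt += 1
--     else:
--       d -= 1
--       cnt += 1
--   return cnt
-- ===== SOURCE B (Python) =====
-- def stone(n):
--     # closed form: each subtraction of 3 counts once, remainder handled by 1s
--     return n // 3 + n % 3
-- ===== Notes on version B (the rewrite author's own statement) =====
-- stated objective: faster
-- what changed: Replaces the subtract-3-or-1 counting loop by the closed form n//3 + n%3.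
import Mathlib
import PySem

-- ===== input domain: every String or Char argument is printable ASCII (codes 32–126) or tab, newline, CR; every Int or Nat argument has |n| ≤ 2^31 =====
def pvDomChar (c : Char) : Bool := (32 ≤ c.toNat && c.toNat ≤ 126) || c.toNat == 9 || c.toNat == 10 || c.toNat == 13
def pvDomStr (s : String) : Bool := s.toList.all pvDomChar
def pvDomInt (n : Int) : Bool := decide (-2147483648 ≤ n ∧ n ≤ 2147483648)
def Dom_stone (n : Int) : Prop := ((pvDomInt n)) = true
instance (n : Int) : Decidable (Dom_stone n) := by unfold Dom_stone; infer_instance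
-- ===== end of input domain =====

-- B replaces A's subtract-3-or-1 loop by the closed form n//3 + n%3 (O(1) vs O(n)).
-- ===== PORT A =====
-- A's while loop; the final `else` branch (d < 0, d ≠ 0) is a totality guard:
-- there the Python loop never terminates, and Pre_stone excludes those inputs.
def stoneLoop (d cnt : Int) : Int :=
  if d = 0 then cnt
  else if d ≥ 3 then stoneLoop (d - 3) (cnt + 1)
  else if 0 < d then stoneLoop (d - 1) (cnt + 1)
  else cnt
termination_by d.toNat
decreasing_by all_goals omega

def stone (n : Int) : Int := stoneLoop n 0

-- ===== PORT B =====
def stone_alt (n : Int) : Int := PySem.Int.floordiv n 3 + PySem.Int.mod n 3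

-- ===== PRECONDITION & SPEC =====
-- A's while loop never terminates for n < 0 (it keeps subtracting 1), so Pre_ excludes negatives.
def Pre_stone (n : Int) : Prop := 0 ≤ n
instance (n : Int) : Decidable (Pre_stone n) := by unfold Pre_stone; infer_instance
def pvWitness_stone : Int := 7
def Spec_stone (n : Int) (out : Int) : Prop := out = stone_alt n
instance (n : Int) (out : Int) : Decidable (Spec_stone n out) := by unfold Spec_stone; infer_instance

-- ===== CLAIM (what is proved, stated in full; the proofs are below) =====
def Claim_equal_stone : Prop := ∀ (n : Int), Dom_stone n → Pre_stone n → Spec_stone n (stone n)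

-- ===== LEMMAS AND PROOFS =====
theorem stoneLoop_closed (k : Nat) (d cnt : Int) (hk : d.toNat = k) (h : 0 ≤ d) :
    stoneLoop d cnt = cnt + d / 3 + d % 3 := by
  induction k using Nat.strong_induction_on generalizing d cnt with
  | _ k ih =>
    unfold stoneLoop
    split_ifs with h0 h3 h1
    · omega
    · rw [ih (d - 3).toNat (by omega) _ _ rfl (by omega)]; omega
    · rw [ih (d - 1).toNat (by omega) _ _ rfl (by omega)]; omega
    · omega

-- ===== VERDICT (by name: the statement is the Claim_ definition above) =====
theorem stone_spec : Claim_equal_stone := by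
  intro n _ hp
  unfold Spec_stone stone stone_alt
  rw [stoneLoop_closed n.toNat n 0 rfl hp,
    PySem.Int.floordiv_eq_ediv_of_pos (by omega),
    PySem.Int.mod_eq_emod_of_pos (by omega)]
  omega
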